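-- pv_equiv track=rewrite | github.com/ukisoft/procon | AntBook_python/19_bribe_the_prisoners.py | solve
-- ===== SOURCE A (Python) =====
-- def solve(p: int, q: int, a: list):
--     """
--     最後に空室にした際に、支払わなければならないコインの数を計算する
--     最も支払いが少ない部屋が最後に支払われるべき部屋となる
--     上記で計算した最少支払コイン数を result に追加する
--     上記の部屋が空室ではないという条件で、再度支払わなければならないコインの数を計算する
--     これを空室がなくなるまで続け、最後に result を返す
--
--     :param p: 全ての部屋の数
--     :param q: 空室にする部屋の数
--     :param a: 空室にする部屋の位置
--     :return: 最小支払いコイン数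
--     """
--     a.sort()
--     total_coin = 0
--     coins = [_get_coin(a, i, p) for i, _ in enumerate(a)]
--     while a:
--         target_i = coins.index(min(coins))
--         total_coin += coins[target_i]
--         a.pop(target_i)
--         if target_i != 0:
--             coins[target_i - 1] = _get_coin(a, target_i - 1, p)
--         if target_i != len(a):
--             coins[target_i + 1] = _get_coin(a, target_i, p)
--         coins.pop(target_i)
--     return total_coin
--
-- def _get_coin(a, i, p):
--     if i == 0 and i == len(a) - 1:
--         left_coin = a[i] - 1
--         right_coin = p - a[i]
--     elif i == 0:
--         left_coin = a[i] - 1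
--         right_coin = a[i + 1] - a[i] - 1
--     elif i == len(a) - 1:
--         left_coin = a[i] - a[i - 1] - 1
--         right_coin = p - a[i]
--     else:
--         left_coin = a[i] - a[i - 1] - 1
--         right_coin = a[i + 1] - a[i] - 1
--     return left_coin + right_coin
-- ===== SOURCE B (Python) =====
-- def solve(p: int, q: int, a: list):
--     """Same greedy as A, recomputed from a sentinel room list each round instead of
--     maintaining an incrementally-updated coins array (return-value equivalent; like A
--     it sorts `a` in place, but unlike A it does not empty it)."""
--     a.sort()
--     rooms = [0] + a + [p + 1]
--     total = 0
--     while len(rooms) > 2: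
--         gaps = [rooms[i + 1] - rooms[i - 1] - 2 for i in range(1, len(rooms) - 1)]
--         j = gaps.index(min(gaps))
--         total += gaps[j]
--         rooms.pop(j + 1)
--     return total
-- ===== Notes on version B (the rewrite author's own statement) =====
-- stated objective: simpler
-- what changed: B drops A's incrementally maintained coins cache and its 4-branch neighbour-cost helper: it keeps one sentinel room list [0]+a+[p+1] and recomputes each round's gap costs directly from it, picking and popping the cheapest room.
import Mathlib
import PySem

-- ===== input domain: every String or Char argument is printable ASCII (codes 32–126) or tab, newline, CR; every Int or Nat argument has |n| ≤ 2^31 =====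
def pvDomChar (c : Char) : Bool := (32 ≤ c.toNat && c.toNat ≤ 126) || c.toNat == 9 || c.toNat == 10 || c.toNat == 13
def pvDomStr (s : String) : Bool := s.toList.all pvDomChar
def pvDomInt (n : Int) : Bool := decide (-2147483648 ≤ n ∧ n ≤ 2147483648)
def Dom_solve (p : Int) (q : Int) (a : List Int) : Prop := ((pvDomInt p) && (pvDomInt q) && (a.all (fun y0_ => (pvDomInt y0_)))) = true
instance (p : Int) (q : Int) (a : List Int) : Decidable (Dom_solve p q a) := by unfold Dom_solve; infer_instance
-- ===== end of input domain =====

-- B replaces A's incrementally maintained `coins` cache and its 4-branch neighbour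
-- helper by a sentinel room list [0]+a+[p+1] whose gap costs are recomputed each round
-- (objective: simpler). Return-value equivalence only: like A, B sorts `a` in place,
-- but A additionally pops `a` empty while B leaves the sorted list intact.

-- ===== PORT A =====
-- _get_coin(a, i, p); every call site has 0 ≤ i < len(a), so a[i±1] is ported by
-- PySem.List.pyGetD (exact for in-range indices).
def pvGetCoin (a : List Int) (i : Int) (p : Int) : Int :=
  if i = 0 ∧ i = PySem.List.len a - 1 then
    (PySem.List.pyGetD a i 0 - 1) + (p - PySem.List.pyGetD a i 0)
  else if i = 0 then
    (PySem.List.pyGetD a i 0 - 1) + (PySem.List.pyGetD a (i + 1) 0 - PySem.List.pyGetD a i 0 - 1)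
  else if i = PySem.List.len a - 1 then
    (PySem.List.pyGetD a i 0 - PySem.List.pyGetD a (i - 1) 0 - 1) + (p - PySem.List.pyGetD a i 0)
  else
    (PySem.List.pyGetD a i 0 - PySem.List.pyGetD a (i - 1) 0 - 1) + (PySem.List.pyGetD a (i + 1) 0 - PySem.List.pyGetD a i 0 - 1)

-- the `while a:` loop; each iteration pops exactly one element of `a`, so fuel = len(a)
-- makes the recursion terminate exactly when Python's loop condition turns false.
def pvLoopA (p : Int) : Nat → List Int → List Int → Int → Int
  | 0, _, _, total => total
  | fuel + 1, a, coins, total =>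
    let m := (PySem.List.min? coins (fun x => x)).getD 0          -- min(coins)
    let ti : Nat := (PySem.List.index? coins m).getD 0            -- coins.index(…), always nonneg
    let total := total + PySem.List.pyGetD coins (ti : Int) 0     -- total_coin += coins[target_i]
    let a' := ((PySem.List.pop? a (ti : Int)).getD (0, [])).2     -- a.pop(target_i), value unused
    let coins1 := if ti ≠ 0 then
        PySem.List.pySetD coins ((ti : Int) - 1) (pvGetCoin a' ((ti : Int) - 1) p)
      else coins
    let coins2 := if (ti : Int) ≠ PySem.List.len a' then
        PySem.List.pySetD coins1 ((ti : Int) + 1) (pvGetCoin a' (ti : Int) p)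
      else coins1
    let coins3 := ((PySem.List.pop? coins2 (ti : Int)).getD (0, [])).2   -- coins.pop(target_i)
    pvLoopA p fuel a' coins3 total

def solve (p : Int) (q : Int) (a : List Int) : Int :=
  let a := PySem.List.sorted a (fun x => x) false                 -- a.sort()
  let coins := (PySem.List.enumerate a 0).map (fun iv => pvGetCoin a iv.1 p)
  pvLoopA p a.length a coins 0

-- ===== PORT B =====
-- the `while len(rooms) > 2:` loop; each iteration pops one room, so fuel = len(rooms) - 2
-- makes the recursion stop exactly when the condition turns false.
def pvLoopB : Nat → List Int → Int → Int
  | 0, _, total => total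
  | fuel + 1, rooms, total =>
    let gaps := (PySem.List.pyRange 1 (PySem.List.len rooms - 1) 1).map
      (fun i => PySem.List.pyGetD rooms (i + 1) 0 - PySem.List.pyGetD rooms (i - 1) 0 - 2)
    let m := (PySem.List.min? gaps (fun x => x)).getD 0           -- min(gaps)
    let j : Nat := (PySem.List.index? gaps m).getD 0              -- gaps.index(…)
    let total := total + PySem.List.pyGetD gaps (j : Int) 0       -- total += gaps[j]
    let rooms' := ((PySem.List.pop? rooms ((j : Int) + 1)).getD (0, [])).2  -- rooms.pop(j+1)
    pvLoopB fuel rooms' total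

def solve_alt (p : Int) (q : Int) (a : List Int) : Int :=
  let a := PySem.List.sorted a (fun x => x) false                 -- a.sort()
  let rooms := 0 :: (a ++ [p + 1])                                -- [0] + a + [p+1]
  pvLoopB a.length rooms 0

-- ===== PRECONDITION & SPEC =====
def Spec_solve (p : Int) (q : Int) (a : List Int) (out : Int) : Prop := out = solve_alt p q a
instance (p : Int) (q : Int) (a : List Int) (out : Int) : Decidable (Spec_solve p q a out) := by unfold Spec_solve; infer_instance

-- ===== CLAIM (what is proved, stated in full; the proofs are below) =====
def Claim_equal_solve : Prop := ∀ (p : Int) (q : Int) (a : List Int), Dom_solve p q a → Spec_solve p q a (solve p q a)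

-- ===== LEMMAS AND PROOFS =====

-- the cost list both programs effectively minimise over: for each occupied room k,
-- (next room or p+1) - (previous room or 0) - 2, read off the sentinel list.
def pvCosts (p : Int) (a : List Int) : List Int :=
  (List.range a.length).map (fun k =>
    (0 :: (a ++ [p + 1])).getD (k + 2) 0 - (0 :: (a ++ [p + 1])).getD k 0 - 2)

theorem pvCosts_length (p : Int) (a : List Int) : (pvCosts p a).length = a.length := by
  simp [pvCosts]

theorem pvCosts_getElem (p : Int) (a : List Int) (k : Nat) (hk : k < (pvCosts p a).length) :
    (pvCosts p a)[k] =
      (0 :: (a ++ [p + 1])).getD (k + 2) 0 - (0 :: (a ++ [p + 1])).getD k 0 - 2 := by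
  simp [pvCosts]

-- reading the sentinel list
theorem pvSentinel_mid (p : Int) (a : List Int) (j : Nat) (hj : j < a.length) :
    (0 :: (a ++ [p + 1])).getD (j + 1) 0 = a.getD j 0 := by
  rw [List.getD_cons_succ]; exact List.getD_append a [p + 1] 0 j hj

theorem pvSentinel_last (p : Int) (a : List Int) :
    (0 :: (a ++ [p + 1])).getD (a.length + 1) 0 = p + 1 := by
  rw [List.getD_cons_succ, List.getD_append_right a [p + 1] 0 a.length le_rfl]; simp

-- _get_coin's four branches are one sentinel-difference formula
theorem pvGetCoin_eq (p : Int) (a : List Int) (k : Nat) (hk : k < a.length) :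
    pvGetCoin a (k : Int) p =
      (0 :: (a ++ [p + 1])).getD (k + 2) 0 - (0 :: (a ++ [p + 1])).getD k 0 - 2 := by
  have e0 : ((k : Int) = 0) ↔ (k = 0) := by omega
  have e1 : ((k : Int) = (a.length : Int) - 1) ↔ (k = a.length - 1) := by omega
  rw [pvGetCoin]
  simp only [PySem.List.len_eq, e0, e1, PySem.List.pyGetD_natCast]
  rcases k with _ | k'
  · by_cases h1 : 0 = a.length - 1
    · rw [if_pos ⟨rfl, h1⟩, show 0 + 2 = a.length + 1 by omega, pvSentinel_last,
        List.getD_cons_zero]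
      ring
    · rw [if_neg (by tauto), if_pos rfl,
        show ((0 : Nat) : Int) + 1 = ((1 : Nat) : Int) by norm_num,
        PySem.List.pyGetD_natCast, show (0 : Nat) + 2 = 1 + 1 from rfl,
        pvSentinel_mid p a 1 (by omega), List.getD_cons_zero]
      ring
  · have h0 : ¬ (k' + 1 = 0) := by omega
    have hc2 : ((k' + 1 : Nat) : Int) - 1 = ((k' : Nat) : Int) := by push_cast; ring
    have hmid0 : (0 :: (a ++ [p + 1])).getD (k' + 1) 0 = a.getD k' 0 :=
      pvSentinel_mid p a k' (by omega)
    by_cases h1 : k' + 1 = a.length - 1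
    · rw [if_neg (by tauto), if_neg h0, if_pos h1, hc2, PySem.List.pyGetD_natCast,
        show k' + 1 + 2 = a.length + 1 by omega, pvSentinel_last, hmid0]
      ring
    · rw [if_neg (by tauto), if_neg h0, if_neg h1]
      have hc1 : ((k' + 1 : Nat) : Int) + 1 = ((k' + 2 : Nat) : Int) := by push_cast; ring
      rw [hc1, hc2, PySem.List.pyGetD_natCast, PySem.List.pyGetD_natCast,
        show k' + 1 + 2 = (k' + 2) + 1 from rfl, pvSentinel_mid p a (k' + 2) (by omega), hmid0]
      ring

-- the sentinel list of the popped room list is the popped sentinel list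
theorem pvRooms_erase (p : Int) (a : List Int) (ti : Nat) (hti : ti < a.length) :
    0 :: (a.eraseIdx ti ++ [p + 1]) = (0 :: (a ++ [p + 1])).eraseIdx (ti + 1) := by
  rw [List.eraseIdx_cons_succ, List.eraseIdx_append_of_lt_length hti]

-- getD through eraseIdx, for in-range indices
theorem pvGetD_eraseIdx (l : List Int) (i j : Nat) (hi : i < l.length) (hj : j < l.length - 1) :
    (l.eraseIdx i).getD j 0 = if j < i then l.getD j 0 else l.getD (j + 1) 0 := by
  have hj' : j < (l.eraseIdx i).length := by rw [List.length_eraseIdx]; simp [hi]; omega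
  rw [List.getD_eq_getElem _ _ hj', List.getElem_eraseIdx]
  by_cases hji : j < i
  · rw [dif_pos hji, if_pos hji, List.getD_eq_getElem _ _ (by omega)]
  · rw [dif_neg hji, if_neg hji, List.getD_eq_getElem _ _ (by omega)]

-- A's in-place surgery on the cost list equals recomputation after the pop
theorem pvSurgery (p : Int) (a : List Int) (ti : Nat) (hti : ti < a.length) :
    ((if (ti : Int) ≠ (((a.eraseIdx ti).length : Nat) : Int) then
        (if ti ≠ 0 then
            (pvCosts p a).set (ti - 1) (pvGetCoin (a.eraseIdx ti) ((ti : Int) - 1) p)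
          else pvCosts p a).set (ti + 1) (pvGetCoin (a.eraseIdx ti) (ti : Int) p)
      else
        (if ti ≠ 0 then
            (pvCosts p a).set (ti - 1) (pvGetCoin (a.eraseIdx ti) ((ti : Int) - 1) p)
          else pvCosts p a)).eraseIdx ti) = pvCosts p (a.eraseIdx ti) := by
  have hlen' : (a.eraseIdx ti).length = a.length - 1 := by
    rw [List.length_eraseIdx]; simp [hti]
  apply List.ext_getElem
  · simp only [List.length_eraseIdx, apply_ite List.length, List.length_set,
      pvCosts_length, hlen']
    split_ifs <;> omega
  · intro k h1 h2
    have hk : k < a.length - 1 := by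
      rw [pvCosts_length, hlen'] at h2; exact h2
    rw [pvCosts_getElem _ _ k h2, pvRooms_erase p a ti hti,
      pvGetD_eraseIdx _ _ _ (by simp; omega) (by simp; omega),
      pvGetD_eraseIdx _ _ _ (by simp; omega) (by simp; omega)]
    by_cases hc : (ti : Int) ≠ (((a.eraseIdx ti).length : Nat) : Int) <;>
      by_cases h0 : ti ≠ 0
    · -- both neighbour updates fired
      simp only [if_pos hc, if_pos h0, List.getElem_eraseIdx]
      by_cases hkt : k < ti
      · rw [dif_pos hkt, List.getElem_set, if_neg (by omega)]
        by_cases hk1 : k = ti - 1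
        · subst hk1
          rw [List.getElem_set, if_pos (by omega),
            show (ti : Int) - 1 = ((ti - 1 : Nat) : Int) by omega,
            pvGetCoin_eq p (a.eraseIdx ti) (ti - 1) (by rw [hlen']; omega),
            pvRooms_erase p a ti hti,
            pvGetD_eraseIdx _ _ _ (by simp; omega) (by simp; omega),
            pvGetD_eraseIdx _ _ _ (by simp; omega) (by simp; omega)]
        · rw [List.getElem_set, if_neg (by omega),
            pvCosts_getElem _ _ k (by rw [pvCosts_length]; omega)]
          split_ifs <;> first | rfl | omega
      · rw [dif_neg hkt]
        by_cases hk0 : k = ti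
        · subst hk0
          rw [List.getElem_set, if_pos (by omega),
            pvGetCoin_eq p (a.eraseIdx k) k (by rw [hlen']; omega),
            pvRooms_erase p a k hti,
            pvGetD_eraseIdx _ _ _ (by simp; omega) (by simp; omega),
            pvGetD_eraseIdx _ _ _ (by simp; omega) (by simp; omega)]
        · rw [List.getElem_set, if_neg (by omega), List.getElem_set, if_neg (by omega),
            pvCosts_getElem _ _ (k + 1) (by rw [pvCosts_length]; omega)]
          split_ifs <;> first | rfl | omega
    · -- ti = 0: only the right neighbour update fired
      simp only [if_pos hc, if_neg h0, List.getElem_eraseIdx]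
      rw [dif_neg (by omega)]
      by_cases hk0 : k = ti
      · subst hk0
        rw [List.getElem_set, if_pos (by omega),
          pvGetCoin_eq p (a.eraseIdx k) k (by rw [hlen']; omega),
          pvRooms_erase p a k hti,
          pvGetD_eraseIdx _ _ _ (by simp; omega) (by simp; omega),
          pvGetD_eraseIdx _ _ _ (by simp; omega) (by simp; omega)]
      · rw [List.getElem_set, if_neg (by omega),
          pvCosts_getElem _ _ (k + 1) (by rw [pvCosts_length]; omega)]
        split_ifs <;> first | rfl | omega
    · -- ti is the last index: only the left neighbour update fired
      have htl : ti + 1 = a.length := by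
        by_contra hne
        exact hc (by rw [hlen']; omega)
      simp only [if_neg hc, if_pos h0, List.getElem_eraseIdx]
      rw [dif_pos (by omega)]
      by_cases hk1 : k = ti - 1
      · subst hk1
        rw [List.getElem_set, if_pos (by omega),
          show (ti : Int) - 1 = ((ti - 1 : Nat) : Int) by omega,
          pvGetCoin_eq p (a.eraseIdx ti) (ti - 1) (by rw [hlen']; omega),
          pvRooms_erase p a ti hti,
          pvGetD_eraseIdx _ _ _ (by simp; omega) (by simp; omega),
          pvGetD_eraseIdx _ _ _ (by simp; omega) (by simp; omega)]
      · rw [List.getElem_set, if_neg (by omega),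
          pvCosts_getElem _ _ k (by rw [pvCosts_length]; omega)]
        split_ifs <;> first | rfl | omega
    · -- ti = 0 and last index at once: a is a singleton, no surviving index
      have h1len : a.length = 1 := by
        have hti0 : ti = 0 := by omega
        by_contra hne
        exact hc (by rw [hlen']; omega)
      omega

-- B's recomputed gap list is exactly the cost list
theorem pvGaps_eq (p : Int) (a : List Int) :
    (PySem.List.pyRange 1 (PySem.List.len (0 :: (a ++ [p + 1])) - 1) 1).map
      (fun i => PySem.List.pyGetD (0 :: (a ++ [p + 1])) (i + 1) 0 -
                PySem.List.pyGetD (0 :: (a ++ [p + 1])) (i - 1) 0 - 2) = pvCosts p a := by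
  have hl : PySem.List.len (0 :: (a ++ [p + 1])) - 1 = ((a.length : Int) + 1) := by
    simp [PySem.List.len_eq]
  rw [hl, PySem.List.pyRange_one]
  have ht : ((a.length : Int) + 1 - 1).toNat = a.length := by omega
  rw [ht, List.map_map]
  unfold pvCosts
  apply List.map_congr_left
  intro k hk
  have hk' : k < a.length := List.mem_range.mp hk
  simp only [Function.comp_apply]
  have e1 : (1 : Int) + (k : Int) + 1 = ((k + 2 : Nat) : Int) := by push_cast; ring
  have e2 : (1 : Int) + (k : Int) - 1 = ((k : Nat) : Int) := by omega
  rw [e1, e2, PySem.List.pyGetD_natCast, PySem.List.pyGetD_natCast]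

-- A's initial coins comprehension is the cost list
theorem pvInit (p : Int) (a : List Int) :
    (PySem.List.enumerate a 0).map (fun iv => pvGetCoin a iv.1 p) = pvCosts p a := by
  apply List.ext_getElem
  · simp [PySem.List.length_enumerate, pvCosts_length]
  · intro k h1 h2
    have hk : k < a.length := by
      simpa [PySem.List.length_enumerate] using h1
    rw [List.getElem_map, PySem.List.getElem_enumerate]
    simp only [zero_add]
    rw [pvGetCoin_eq p a k hk, pvCosts_getElem _ _ k h2]

-- the coins surgery in A's loop body, exactly as the port writes it
theorem pvStepCoins (p : Int) (a : List Int) (j : Nat) (hja : j < a.length) :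
    ((PySem.List.pop?
      (if (j : Int) ≠ PySem.List.len (a.eraseIdx j) then
        PySem.List.pySetD
          (if j ≠ 0 then
            PySem.List.pySetD (pvCosts p a) ((j : Int) - 1)
              (pvGetCoin (a.eraseIdx j) ((j : Int) - 1) p)
          else pvCosts p a) ((j : Int) + 1) (pvGetCoin (a.eraseIdx j) (j : Int) p)
      else
        (if j ≠ 0 then
          PySem.List.pySetD (pvCosts p a) ((j : Int) - 1)
            (pvGetCoin (a.eraseIdx j) ((j : Int) - 1) p)
        else pvCosts p a)) ((j : Int))).getD (0, [])).2 = pvCosts p (a.eraseIdx j) := by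
  have hs := pvSurgery p a j hja
  have hc1 : ((j : Int) + 1) = (((j + 1 : Nat)) : Int) := by push_cast; ring
  simp only [PySem.List.len_eq]
  by_cases h0 : j ≠ 0
  · rw [if_pos h0,
      PySem.List.pySetD_of_nonneg _ _ (by omega : (0 : Int) ≤ (j : Int) - 1),
      show ((j : Int) - 1).toNat = j - 1 by omega, hc1, PySem.List.pySetD_natCast,
      PySem.List.pop?_natCast _ j
        (by split_ifs <;> simp only [List.length_set, pvCosts_length] <;> omega),
      Option.getD_some]
    rw [if_pos h0] at hs
    exact hs
  · rw [if_neg h0, hc1, PySem.List.pySetD_natCast,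
      PySem.List.pop?_natCast _ j
        (by split_ifs <;> simp only [List.length_set, pvCosts_length] <;> omega),
      Option.getD_some]
    rw [if_neg h0] at hs
    exact hs

-- main simulation: with the cost-list invariant, A's loop computes B's loop
theorem pvSim (p : Int) : ∀ (fuel : Nat) (a : List Int) (total : Int), a.length = fuel →
    pvLoopA p fuel a (pvCosts p a) total = pvLoopB fuel (0 :: (a ++ [p + 1])) total := by
  intro fuel
  induction fuel with
  | zero => intro a total _; rfl
  | succ fuel ih =>
    intro a total hlen
    have hcl : (pvCosts p a).length = a.length := pvCosts_length p a
    have hne : pvCosts p a ≠ [] := by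
      intro h; rw [h] at hcl; simp at hcl; omega
    obtain ⟨m, hm⟩ : ∃ m, PySem.List.min? (pvCosts p a) (fun x => x) = some m := by
      cases h : PySem.List.min? (pvCosts p a) (fun x => x) with
      | none => exact absurd ((PySem.List.min?_eq_none_iff _ _).mp h) hne
      | some m => exact ⟨m, rfl⟩
    have hmem : m ∈ pvCosts p a := PySem.List.min?_mem hm
    obtain ⟨j, hj⟩ : ∃ j, PySem.List.index? (pvCosts p a) m = some j := by
      have hs : (PySem.List.index? (pvCosts p a) m).isSome := by
        rw [PySem.List.index?_isSome_iff]; exact hmem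
      exact Option.isSome_iff_exists.mp hs
    obtain ⟨hjlt, -, -⟩ := PySem.List.getElem_of_index?_eq_some hj
    have hja : j < a.length := by omega
    simp only [pvLoopA, pvLoopB]
    rw [pvGaps_eq]
    simp only [hm, hj, Option.getD_some]
    rw [PySem.List.pop?_natCast a j hja]
    simp only [Option.getD_some]
    rw [pvStepCoins p a j hja]
    have hc : ((j : Int) + 1) = (((j + 1 : Nat)) : Int) := by push_cast; ring
    rw [hc, PySem.List.pop?_natCast (0 :: (a ++ [p + 1])) (j + 1) (by simp; omega)]
    simp only [Option.getD_some]
    rw [← pvRooms_erase p a j hja]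
    exact ih (a.eraseIdx j) _ (by rw [List.length_eraseIdx]; simp [hja]; omega)

-- ===== VERDICT (by name: the statement is the Claim_ definition above) =====
theorem solve_spec : Claim_equal_solve := by
  intro p q a _
  show solve p q a = solve_alt p q a
  simp only [solve, solve_alt]
  rw [pvInit]
  exact pvSim p _ _ 0 rfl
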